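-- pv_equiv track=rewrite | github.com/xlrobotics/preference-based-planning | parser/scltlpref.py | ltl_next
-- ===== SOURCE A (Python) =====
-- def ltl_next(args):
--     """Parse LTLf Next."""
--     if len(args) == 1:
--         return str(args[0])
--     else:
--         f = str(args[-1])
--         for _ in args[:-1]:
--             f = f"X({f})"
--         return f
-- ===== SOURCE B (Python) =====
-- def ltl_next(args):
--     """Parse LTLf Next."""
--     n = len(args) - 1
--     return "X(" * n + str(args[-1]) + ")" * n
-- ===== Notes on version B (the rewrite author's own statement) =====
-- stated objective: faster
-- what changed: Replaces the element-by-element re-wrapping loop (which rebuilds the whole string each step) with a closed-form build: string multiplication produces all len(args)-1 opening 'X(' prefixes and closing ')' suffixes at once around args[-1].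
import Mathlib
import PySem

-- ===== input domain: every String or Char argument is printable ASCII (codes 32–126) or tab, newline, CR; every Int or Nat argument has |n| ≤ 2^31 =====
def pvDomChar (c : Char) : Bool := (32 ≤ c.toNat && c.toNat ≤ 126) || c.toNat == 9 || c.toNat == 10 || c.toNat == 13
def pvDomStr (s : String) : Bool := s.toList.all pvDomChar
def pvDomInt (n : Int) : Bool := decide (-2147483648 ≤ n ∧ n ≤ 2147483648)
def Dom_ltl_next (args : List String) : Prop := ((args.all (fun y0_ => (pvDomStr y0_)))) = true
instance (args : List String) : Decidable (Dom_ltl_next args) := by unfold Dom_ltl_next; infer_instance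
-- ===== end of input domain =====

-- B replaces A's re-wrapping loop with a closed-form build ("X(" * n ++ last ++ ")" * n); simpler, same results.

-- ===== PORT A =====
-- A: if len(args)==1 return args[0]; else wrap args[-1] in X(·) once per element of args[:-1].
def ltl_next (args : List String) : String :=
  if args.length = 1 then
    PySem.List.pyGetD args 0 ""
  else
    let f := PySem.List.pyGetD args (-1) ""
    (PySem.List.slice args none (some (-1))).foldl (fun f _ => "X(" ++ f ++ ")") f

-- ===== PORT B =====
-- port of Python's "s" * n (n ≥ 0)
def strMul (s : String) : Nat → String
  | 0 => ""
  | n + 1 => s ++ strMul s n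

def ltl_next_alt (args : List String) : String :=
  let n := args.length - 1
  strMul "X(" n ++ PySem.List.pyGetD args (-1) "" ++ strMul ")" n

-- ===== PRECONDITION & SPEC =====
-- Both A and B raise IndexError on empty args (args[-1]); Pre_ excludes exactly that.
def Pre_ltl_next (args : List String) : Prop := args ≠ []
instance (args : List String) : Decidable (Pre_ltl_next args) := by unfold Pre_ltl_next; infer_instance
def pvWitness_ltl_next : List String := ["a", "b"]
def Spec_ltl_next (args : List String) (out : String) : Prop := out = ltl_next_alt args
instance (args : List String) (out : String) : Decidable (Spec_ltl_next args out) := by unfold Spec_ltl_next; infer_instance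

-- ===== CLAIM (what is proved, stated in full; the proofs are below) =====
def Claim_equal_ltl_next : Prop := ∀ (args : List String), Dom_ltl_next args → Pre_ltl_next args → Spec_ltl_next args (ltl_next args)

-- ===== LEMMAS AND PROOFS =====
theorem strMul_comm_self (s : String) (n : Nat) : strMul s n ++ s = s ++ strMul s n := by
  induction n with
  | zero => simp [strMul]
  | succ n ih => simp [strMul, String.append_assoc, ih]

theorem foldl_wrap (l : List String) (f : String) :
    l.foldl (fun f _ => "X(" ++ f ++ ")") f = strMul "X(" l.length ++ f ++ strMul ")" l.length := by
  induction l generalizing f with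
  | nil => simp [strMul]
  | cons a l ih =>
      simp only [List.foldl_cons, ih, List.length_cons, strMul]
      rw [← String.append_assoc, ← strMul_comm_self]
      simp [String.append_assoc]

-- ===== VERDICT (by name: the statement is the Claim_ definition above) =====
theorem ltl_next_spec : Claim_equal_ltl_next := by
  intro args _ hpre
  unfold Spec_ltl_next ltl_next ltl_next_alt
  by_cases h1 : args.length = 1
  · obtain ⟨a, rest, rfl⟩ := List.exists_cons_of_ne_nil hpre
    have : rest = [] := by simpa using h1
    subst this
    simp [PySem.List.pyGetD_zero_cons, PySem.List.pyGetD_neg_one _ _ hpre, strMul]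
  · simp only [if_neg h1, PySem.List.slice_to_neg_one, foldl_wrap, List.length_dropLast]
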